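-- pv_equiv track=rewrite | github.com/Zikang0/Mirexs | cognitive/agents/security_agent.py | _generate_network_security_recommendations
-- ===== SOURCE A (Python) =====
-- from typing import List, Dict, Any, Optional, Tuple
--
-- def _generate_network_security_recommendations(findings: List[Dict[str, Any]]) -> List[str]:
--     """生成网络安全建议"""
--     recommendations = []
--
--     suspicious_connections = [f for f in findings if f.get('activity_type') == 'suspicious_connection']
--     port_scans = [f for f in findings if f.get('activity_type') == 'port_scan']
--
--     if suspicious_connections:
--         recommendations.append("阻止可疑的外部连接")
--         recommendations.append("审查相关主机的安全状态")
--
--     if port_scans: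
--         recommendations.append("加强防火墙规则，限制端口扫描")
--         recommendations.append("监控源IP的进一步活动")
--
--     if any(f.get('risk_level') == 'high' for f in findings):
--         recommendations.append("立即启动应急响应流程")
--
--     if not recommendations:
--         recommendations.append("网络活动正常，继续保持监控")
--
--     return recommendations
-- ===== SOURCE B (Python) =====
-- from typing import List, Dict, Any
--
-- # All 8 possible recommendation lists, indexed by bitmask:
-- # bit 0 = suspicious_connection seen, bit 1 = port_scan seen, bit 2 = high risk seen.
-- _S = ["阻止可疑的外部连接", "审查相关主机的安全状态"]
-- _P = ["加强防火墙规则，限制端口扫描", "监控源IP的进一步活动"]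
-- _H = ["立即启动应急响应流程"]
-- _REC_TABLE = [
--     ["网络活动正常，继续保持监控"],  # 0b000
--     _S,                              # 0b001
--     _P,                              # 0b010
--     _S + _P,                         # 0b011
--     _H,                              # 0b100
--     _S + _H,                         # 0b101
--     _P + _H,                         # 0b110
--     _S + _P + _H,                    # 0b111
-- ]
--
-- def _generate_network_security_recommendations(findings: List[Dict[str, Any]]) -> List[str]:
--     """生成网络安全建议（位掩码 + 预计算结果表）"""
--     mask = 0
--     for f in findings:
--         mask |= ((1 if f.get('activity_type') == 'suspicious_connection' else 0)
--                  | (2 if f.get('activity_type') == 'port_scan' else 0)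
--                  | (4 if f.get('risk_level') == 'high' else 0))
--     return list(_REC_TABLE[mask])
-- ===== Notes on version B (the rewrite author's own statement) =====
-- stated objective: alternative
-- what changed: Instead of A's chain of conditional appends driven by three separate scans, B folds the findings once into a 3-bit mask and returns the answer by indexing a precomputed table of all 8 possible recommendation lists, eliminating every conditional append (including the empty-result default, which is just table entry 0).
import Mathlib
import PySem

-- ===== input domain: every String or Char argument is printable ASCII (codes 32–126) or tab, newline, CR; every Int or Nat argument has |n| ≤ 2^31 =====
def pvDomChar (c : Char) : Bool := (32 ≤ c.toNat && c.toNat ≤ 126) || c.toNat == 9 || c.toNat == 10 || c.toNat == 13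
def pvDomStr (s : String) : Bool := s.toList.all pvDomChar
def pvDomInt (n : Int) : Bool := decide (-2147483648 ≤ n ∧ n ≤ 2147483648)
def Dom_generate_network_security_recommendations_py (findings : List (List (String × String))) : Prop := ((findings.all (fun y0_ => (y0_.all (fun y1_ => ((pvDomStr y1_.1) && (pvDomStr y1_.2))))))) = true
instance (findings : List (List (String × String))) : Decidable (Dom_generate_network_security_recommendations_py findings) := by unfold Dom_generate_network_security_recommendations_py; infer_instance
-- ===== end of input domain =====

-- B replaces A's three scans + chain of conditional appends with one fold into a 3-bit mask and a lookup in a precomputed table of all 8 possible outputs; same cost, different structure.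
-- ===== PORT A =====
def generate_network_security_recommendations_py (findings : List (List (String × String))) : List String :=
  let suspicious_connections := findings.filter (fun f => PySem.Dict.get? (PySem.Dict.mk f) "activity_type" == some "suspicious_connection")
  let port_scans := findings.filter (fun f => PySem.Dict.get? (PySem.Dict.mk f) "activity_type" == some "port_scan")
  let recommendations : List String := []
  let recommendations := if suspicious_connections.isEmpty then recommendations
    else recommendations ++ ["阻止可疑的外部连接", "审查相关主机的安全状态"]
  let recommendations := if port_scans.isEmpty then recommendations
    else recommendations ++ ["加强防火墙规则，限制端口扫描", "监控源IP的进一步活动"]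
  let recommendations := if findings.any (fun f => PySem.Dict.get? (PySem.Dict.mk f) "risk_level" == some "high") then
    recommendations ++ ["立即启动应急响应流程"] else recommendations
  if recommendations.isEmpty then recommendations ++ ["网络活动正常，继续保持监控"] else recommendations

-- ===== PORT B =====
-- _REC_TABLE[m] (Python list indexing; mask is always < 8, default for totality only)
def pvRecTable (m : Nat) : List String :=
  match m with
  | 0 => ["网络活动正常，继续保持监控"]
  | 1 => ["阻止可疑的外部连接", "审查相关主机的安全状态"]
  | 2 => ["加强防火墙规则，限制端口扫描", "监控源IP的进一步活动"]
  | 3 => ["阻止可疑的外部连接", "审查相关主机的安全状态", "加强防火墙规则，限制端口扫描", "监控源IP的进一步活动"]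
  | 4 => ["立即启动应急响应流程"]
  | 5 => ["阻止可疑的外部连接", "审查相关主机的安全状态", "立即启动应急响应流程"]
  | 6 => ["加强防火墙规则，限制端口扫描", "监控源IP的进一步活动", "立即启动应急响应流程"]
  | 7 => ["阻止可疑的外部连接", "审查相关主机的安全状态", "加强防火墙规则，限制端口扫描", "监控源IP的进一步活动", "立即启动应急响应流程"]
  | _ => []

-- one iteration of B's loop: mask |= bits(f)
def pvMaskStep (m : Nat) (f : List (String × String)) : Nat :=
  m ||| ((if PySem.Dict.get? (PySem.Dict.mk f) "activity_type" == some "suspicious_connection" then 1 else 0)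
     ||| (if PySem.Dict.get? (PySem.Dict.mk f) "activity_type" == some "port_scan" then 2 else 0)
     ||| (if PySem.Dict.get? (PySem.Dict.mk f) "risk_level" == some "high" then 4 else 0))

def generate_network_security_recommendations_py_alt (findings : List (List (String × String))) : List String :=
  pvRecTable (findings.foldl pvMaskStep 0)

-- ===== PRECONDITION & SPEC =====
def Spec_generate_network_security_recommendations_py (findings : List (List (String × String))) (out : List String) : Prop := out = generate_network_security_recommendations_py_alt findings
instance (findings : List (List (String × String))) (out : List String) : Decidable (Spec_generate_network_security_recommendations_py findings out) := by unfold Spec_generate_network_security_recommendations_py; infer_instance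

-- ===== CLAIM =====
def Claim_equal_generate_network_security_recommendations_py : Prop := ∀ (findings : List (List (String × String))), Dom_generate_network_security_recommendations_py findings → Spec_generate_network_security_recommendations_py findings (generate_network_security_recommendations_py findings)

-- ===== LEMMAS AND PROOFS =====
theorem pvMask_foldl (l : List (List (String × String))) (m : Nat) :
    l.foldl pvMaskStep m =
      m ||| ((if l.any (fun f => PySem.Dict.get? (PySem.Dict.mk f) "activity_type" == some "suspicious_connection") then 1 else 0)
         ||| (if l.any (fun f => PySem.Dict.get? (PySem.Dict.mk f) "activity_type" == some "port_scan") then 2 else 0)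
         ||| (if l.any (fun f => PySem.Dict.get? (PySem.Dict.mk f) "risk_level" == some "high") then 4 else 0)) := by
  induction l generalizing m with
  | nil => simp
  | cons f t ih =>
      simp only [List.foldl_cons, List.any_cons, ih, pvMaskStep]
      by_cases h1 : (PySem.Dict.get? (PySem.Dict.mk f) "activity_type" == some "suspicious_connection") = true <;>
      by_cases h2 : (PySem.Dict.get? (PySem.Dict.mk f) "activity_type" == some "port_scan") = true <;>
      by_cases h3 : (PySem.Dict.get? (PySem.Dict.mk f) "risk_level" == some "high") = true <;>
      by_cases h4 : (t.any fun f => PySem.Dict.get? (PySem.Dict.mk f) "activity_type" == some "suspicious_connection") = true <;>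
      by_cases h5 : (t.any fun f => PySem.Dict.get? (PySem.Dict.mk f) "activity_type" == some "port_scan") = true <;>
      by_cases h6 : (t.any fun f => PySem.Dict.get? (PySem.Dict.mk f) "risk_level" == some "high") = true <;>
      simp [h1, h2, h3, h4, h5, h6, Nat.or_assoc]

theorem pvFilter_isEmpty {α : Type} (l : List α) (p : α → Bool) :
    (l.filter p).isEmpty = !l.any p := by
  induction l with
  | nil => rfl
  | cons x t ih => by_cases h : p x = true <;> simp [h, ih]

-- ===== VERDICT =====
theorem generate_network_security_recommendations_py_spec : Claim_equal_generate_network_security_recommendations_py := by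
  intro findings _
  unfold Spec_generate_network_security_recommendations_py
  unfold generate_network_security_recommendations_py generate_network_security_recommendations_py_alt
  rw [pvMask_foldl]
  simp only [pvFilter_isEmpty]
  cases h1 : findings.any (fun f => PySem.Dict.get? (PySem.Dict.mk f) "activity_type" == some "suspicious_connection") <;>
  cases h2 : findings.any (fun f => PySem.Dict.get? (PySem.Dict.mk f) "activity_type" == some "port_scan") <;>
  cases h3 : findings.any (fun f => PySem.Dict.get? (PySem.Dict.mk f) "risk_level" == some "high") <;> simp [pvRecTable]
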